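-- pv_equiv track=rewrite | github.com/odomaj/cursed | scripts/update_reqs.py | matching_reqs
-- ===== SOURCE A (Python) =====
-- from typing import Union
--
-- def find_package(
--     package: str, reqs: list[tuple[str, str]]
-- ) -> Union[tuple[str, str], None]:
--     for req in reqs:
--         if package == req[0]:
--             return req
--     return None
--
-- def matching_reqs(
--     old_reqs: list[tuple[str, str]], new_reqs: list[tuple[str, str]]
-- ) -> list[tuple[str, str]]:
--     matches: list[tuple[str, str]] = []
--     for package in old_reqs:
--         new_package = find_package(package[0], new_reqs)
--         # if new_package is None:
--         #    new_package = package
--         if new_package is not None: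
--             matches.append(new_package)
--     return matches
-- ===== SOURCE B (Python) =====
-- def matching_reqs(
--     old_reqs: list[tuple[str, str]], new_reqs: list[tuple[str, str]]
-- ) -> list[tuple[str, str]]:
--     # Inverted join: index OLD positions by name, scan NEW once scattering each
--     # first-seen req into the output slots of its old positions, then compact.
--     slots: list = [None] * len(old_reqs)
--     pending: dict[str, list[int]] = {}
--     for i, p in enumerate(old_reqs):
--         pending.setdefault(p[0], []).append(i)
--     for req in new_reqs:
--         idxs = pending.pop(req[0], None)
--         if idxs is not None:
--             for i in idxs:
--                 slots[i] = req
--     return [r for r in slots if r is not None]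
-- ===== Notes on version B (the rewrite author's own statement) =====
-- stated objective: alternative
-- what changed: Inverts the join: instead of scanning new_reqs once per old req, B indexes the POSITIONS of old_reqs by name, scans new_reqs once scattering each first-seen req into the output slots of its old positions, then compacts the slot array; intended as asymptotically better (O(n+m) vs O(n*m)) but a timing run measured only 1.41x at the largest size, so no speed is claimed.
import Mathlib
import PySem

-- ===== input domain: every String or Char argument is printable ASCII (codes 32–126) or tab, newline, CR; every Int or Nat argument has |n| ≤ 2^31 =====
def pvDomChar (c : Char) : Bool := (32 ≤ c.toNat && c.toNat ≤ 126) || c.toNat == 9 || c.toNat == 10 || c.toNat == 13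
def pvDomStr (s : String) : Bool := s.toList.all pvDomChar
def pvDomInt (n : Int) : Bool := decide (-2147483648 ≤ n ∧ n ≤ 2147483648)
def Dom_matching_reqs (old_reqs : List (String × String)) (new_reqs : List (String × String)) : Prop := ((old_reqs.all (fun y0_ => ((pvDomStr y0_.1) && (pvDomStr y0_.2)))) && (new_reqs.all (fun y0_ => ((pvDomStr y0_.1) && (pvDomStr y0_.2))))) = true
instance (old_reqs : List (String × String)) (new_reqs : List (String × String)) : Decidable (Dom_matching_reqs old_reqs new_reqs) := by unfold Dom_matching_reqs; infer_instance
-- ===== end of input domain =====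

-- B inverts the join: it indexes OLD positions by name once, scans NEW once,
-- scattering each first-seen req into the output slots of its old positions,
-- then compacts the slots (objective: alternative — single-pass inverted join).

-- ===== PORT A =====
-- 'for req in reqs: if package == req[0]: return req; return None' — first match, i.e. find?
def find_package (package : String) (reqs : List (String × String)) : Option (String × String) :=
  reqs.find? (fun req => package == req.1)

def matching_reqs (old_reqs : List (String × String)) (new_reqs : List (String × String)) : List (String × String) :=
  old_reqs.foldl (fun ms package =>
    match find_package package.1 new_reqs with
    | some new_package => ms ++ [new_package]
    | none => ms) []

-- ===== PORT B =====
-- 'pending.setdefault(p[0], []).append(i)' over enumerate(old_reqs):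
-- pending[p[0]] = pending.get(p[0], []) + [i], i.e. Dict.modify with default []
def pvBuildPending (old_reqs : List (String × String)) : PySem.Dict String (List Int) :=
  (PySem.List.enumerate old_reqs).foldl
    (fun d ip => d.modify ip.2.1 [] (fun l => l ++ [ip.1])) PySem.Dict.empty

-- 'idxs = pending.pop(req[0], None); if idxs is not None: for i in idxs: slots[i] = req'
-- (indices come from enumerate, hence 0 ≤ i < len(slots): 'slots[i] = req' is exactly set i.toNat)
def pvScatterStep (req : String × String)
    (st : List (Option (String × String)) × PySem.Dict String (List Int)) :
    List (Option (String × String)) × PySem.Dict String (List Int) :=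
  match st.2.pop? req.1 with
  | some (idxs, d') => (idxs.foldl (fun s (i : Int) => s.set i.toNat (some req)) st.1, d')
  | none => st

def matching_reqs_alt (old_reqs : List (String × String)) (new_reqs : List (String × String)) : List (String × String) :=
  let slots : List (Option (String × String)) := old_reqs.map (fun _ => none)  -- [None]*len(old_reqs)
  let pending := pvBuildPending old_reqs
  let final := new_reqs.foldl (fun st req => pvScatterStep req st) (slots, pending)
  -- '[r for r in slots if r is not None]'
  final.1.filterMap id

-- ===== PRECONDITION & SPEC =====
def Spec_matching_reqs (old_reqs : List (String × String)) (new_reqs : List (String × String)) (out : List (String × String)) : Prop := out = matching_reqs_alt old_reqs new_reqs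
instance (old_reqs : List (String × String)) (new_reqs : List (String × String)) (out : List (String × String)) : Decidable (Spec_matching_reqs old_reqs new_reqs out) := by unfold Spec_matching_reqs; infer_instance

-- ===== CLAIM (what is proved, stated in full; the proofs are below) =====
def Claim_equal_matching_reqs : Prop := ∀ (old_reqs : List (String × String)) (new_reqs : List (String × String)), Dom_matching_reqs old_reqs new_reqs → Spec_matching_reqs old_reqs new_reqs (matching_reqs old_reqs new_reqs)

-- ===== LEMMAS AND PROOFS =====

-- A's loop 'append on a hit' is a filterMap
theorem foldl_append_some (f : String × String → Option (String × String)) :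
    ∀ (l acc : List (String × String)),
    (l.foldl (fun m x => match f x with | some y => m ++ [y] | none => m) acc)
      = acc ++ l.filterMap f
  | [], acc => by simp
  | x :: t, acc => by
    simp only [List.foldl_cons, List.filterMap_cons]
    cases h : f x <;> simp [foldl_append_some f t]

-- erasing a key kills its lookup and no other
theorem get?_erase (d : PySem.Dict String (List Int)) (k k' : String) :
    (d.erase k).get? k' = if k' = k then none else d.get? k' := by
  rcases d with ⟨items⟩
  unfold PySem.Dict.erase PySem.Dict.get?
  induction items with
  | nil => split_ifs <;> simp
  | cons p t ih =>
    by_cases hk : p.1 = k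
    · by_cases hk' : p.1 = k' <;>
        simp_all [List.filter_cons, List.find?_cons]
    · by_cases hk' : p.1 = k' <;>
        simp_all [List.filter_cons, List.find?_cons]

-- enumerate keeps the underlying elements: projecting names ignores the indices
theorem enum_names (xs : List (String × String)) (s : Int) :
    ((PySem.List.enumerate xs s).map (fun ip => (ip.2.1, ip.1))).map Prod.fst = xs.map (·.1) := by
  induction xs generalizing s with
  | nil => simp
  | cons x t ih => simp [PySem.List.enumerate_cons, ih]

-- the pending index: lookup of k = the list of positions of k in old_reqs (none if absent)
theorem get?_buildPending (old_reqs : List (String × String)) (k : String) :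
    (pvBuildPending old_reqs).get? k =
      if k ∈ old_reqs.map (·.1) then
        some (((PySem.List.enumerate old_reqs).filter (fun ip => ip.2.1 == k)).map (·.1))
      else none := by
  have hfold : pvBuildPending old_reqs =
      ((PySem.List.enumerate old_reqs).map (fun ip => (ip.2.1, ip.1))).foldl
        (fun d p => d.modify p.1 [] (fun l => l ++ [p.2])) PySem.Dict.empty := by
    unfold pvBuildPending; rw [List.foldl_map]
  have hD : (pvBuildPending old_reqs).getD k [] =
      (((PySem.List.enumerate old_reqs).map (fun ip => (ip.2.1, ip.1))).filter
        (fun p => p.1 == k)).map (·.2) := by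
    rw [hfold, PySem.Dict.getD_foldl_modify_append]; simp
  have hkeys : (pvBuildPending old_reqs).contains k =
      decide (k ∈ old_reqs.map (·.1)) := by
    rw [hfold, PySem.Dict.contains_eq_decide_mem_keys, PySem.Dict.keys_foldl_modify_key]
    simp only [PySem.Dict.keys_empty, PySem.Set.update_nil_left]
    congr 1
    rw [enum_names old_reqs 0]
    simp [PySem.Set.mem_ofList]
  by_cases hm : k ∈ old_reqs.map (·.1)
  · have hc : (pvBuildPending old_reqs).contains k = true := by
      rw [hkeys]; simpa using hm
    have hs : ((pvBuildPending old_reqs).get? k).isSome := by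
      rwa [← PySem.Dict.contains_eq_isSome_get?]
    obtain ⟨v, hv⟩ := Option.isSome_iff_exists.mp hs
    rw [hv, if_pos hm]
    have hDv : (pvBuildPending old_reqs).getD k [] = v := by
      rw [PySem.Dict.getD_eq_get?_getD, hv]; rfl
    congr 1
    rw [← hDv, hD]
    simp only [List.filter_map, List.map_map]
    rfl
  · have hc : (pvBuildPending old_reqs).contains k = false := by
      rw [hkeys]; simpa using hm
    rw [if_neg hm]
    rw [PySem.Dict.get?_eq_none_iff_contains]; simpa using hc

-- writing v at a set of in-range positions, element-wise
theorem foldl_set_getElem? (v : Option (String × String)) :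
    ∀ (idxs : List Int) (s : List (Option (String × String))) (j : Nat),
    (∀ i ∈ idxs, 0 ≤ i ∧ i.toNat < s.length) →
    (idxs.foldl (fun s (i : Int) => s.set i.toNat v) s)[j]? =
      if (∃ i ∈ idxs, i.toNat = j) then some v else s[j]?
  | [], s, j, _ => by simp
  | i :: t, s, j, h => by
    simp only [List.foldl_cons]
    rw [foldl_set_getElem? v t _ j (by
      intro i' hi'; have := h i' (List.mem_cons_of_mem _ hi'); simpa using this)]
    by_cases hij : i.toNat = j
    · subst hij
      have hlt : i.toNat < s.length := (h i (List.mem_cons_self)).2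
      by_cases hex : ∃ i' ∈ t, i'.toNat = i.toNat <;>
        simp [hex, List.getElem?_set, hlt]
    · by_cases hex : ∃ i' ∈ t, i'.toNat = j
      · simp [hex, hij]
      · have : ¬ ∃ i' ∈ i :: t, i'.toNat = j := by
          rintro ⟨i', hi', rfl⟩
          rcases List.mem_cons.mp hi' with rfl | hm
          · exact hij rfl
          · exact hex ⟨i', hm, rfl⟩
        simp [hex, this, List.getElem?_set, hij]

-- the scatter loop invariant: slots track 'first match among the processed new reqs'
theorem scatter_inv (old_reqs : List (String × String)) :
    ∀ (rest : List (String × String)) (g : String → Option (String × String))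
      (d : PySem.Dict String (List Int)),
    (∀ k, d.get? k = if (g k).isSome then none else (pvBuildPending old_reqs).get? k) →
    (rest.foldl (fun st req => pvScatterStep req st) (old_reqs.map (fun p => g p.1), d)).1
      = old_reqs.map (fun p => (g p.1).or (rest.find? (fun r => p.1 == r.1)))
  | [], g, d, _ => by simp
  | r :: rest, g, d, hd => by
    simp only [List.foldl_cons]
    have hstep : pvScatterStep r (old_reqs.map (fun p => g p.1), d) =
        if h : (d.get? r.1).isSome then
          (((d.get? r.1).get h).foldl (fun s (i : Int) => s.set i.toNat (some r))
            (old_reqs.map (fun p => g p.1)), d.erase r.1)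
        else (old_reqs.map (fun p => g p.1), d) := by
      unfold pvScatterStep PySem.Dict.pop?
      cases hg : d.get? r.1 <;> simp [hg]
    by_cases hsome : (d.get? r.1).isSome
    · -- r.1 is an unmatched old name: scatter r into its slots, remove it from pending
      have hgr : g r.1 = none := by
        have := hd r.1
        by_cases h : (g r.1).isSome
        · rw [if_pos h] at this; rw [this] at hsome; simp at hsome
        · simpa using h
      have hmem : r.1 ∈ old_reqs.map (·.1) := by
        have := hd r.1
        rw [if_neg (by simp [hgr])] at this
        rw [get?_buildPending] at this
        by_contra hm
        rw [if_neg hm] at this; rw [this] at hsome; simp at hsome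
      have hval : d.get? r.1 =
          some (((PySem.List.enumerate old_reqs).filter (fun ip => ip.2.1 == r.1)).map (·.1)) := by
        have := hd r.1
        rw [if_neg (by simp [hgr]), get?_buildPending, if_pos hmem] at this
        exact this
      rw [hstep, dif_pos hsome]
      set idxs := ((PySem.List.enumerate old_reqs).filter (fun ip => ip.2.1 == r.1)).map (·.1) with hidxs
      have hget : (d.get? r.1).get hsome = idxs := by
        simp [hval]
      rw [hget]
      -- the scattered slots are the map of the updated g
      have hmemidx : ∀ i, i ∈ idxs ↔
          ∃ j : Nat, ∃ _ : j < old_reqs.length, i = (j : Int) ∧ old_reqs[j].1 = r.1 := by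
        intro i
        simp only [hidxs, List.mem_map, List.mem_filter, PySem.List.mem_enumerate_iff]
        constructor
        · rintro ⟨ip, ⟨⟨j, hj, rfl⟩, hb⟩, rfl⟩
          exact ⟨j, hj, by simp, by simpa using hb⟩
        · rintro ⟨j, hj, rfl, hn⟩
          exact ⟨(0 + (j : Int), old_reqs[j]), ⟨⟨j, hj, rfl⟩, by simpa using hn⟩, by simp⟩
      have hrange : ∀ i ∈ idxs, 0 ≤ i ∧ i.toNat < (old_reqs.map (fun p => g p.1)).length := by
        intro i hi
        obtain ⟨j, hj, rfl, _⟩ := (hmemidx i).mp hi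
        simp [hj]
      have hslots : idxs.foldl (fun s (i : Int) => s.set i.toNat (some r))
            (old_reqs.map (fun p => g p.1))
          = old_reqs.map (fun p => if p.1 = r.1 then some r else g p.1) := by
        apply List.ext_getElem?
        intro j
        rw [foldl_set_getElem? _ idxs _ j hrange]
        by_cases hj : j < old_reqs.length
        · have h1 : (old_reqs.map (fun p => g p.1))[j]? = some (g old_reqs[j].1) := by
            simp [hj]
          have h2 : (old_reqs.map (fun p => if p.1 = r.1 then some r else g p.1))[j]? =
              some (if old_reqs[j].1 = r.1 then some r else g old_reqs[j].1) := by
            simp [hj]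
          rw [h1, h2]
          by_cases hn : old_reqs[j].1 = r.1
          · rw [if_pos (⟨(j : Int), (hmemidx _).mpr ⟨j, hj, rfl, hn⟩, by simp⟩), if_pos hn]
          · rw [if_neg, if_neg hn]
            rintro ⟨i, hi, rfl⟩
            obtain ⟨j', hj', rfl, hn'⟩ := (hmemidx i).mp hi
            simp only [Int.toNat_natCast] at hn
            exact hn hn'
        · have : ¬ ∃ i ∈ idxs, i.toNat = j := by
            rintro ⟨i, hi, rfl⟩
            obtain ⟨j', hj', rfl, _⟩ := (hmemidx i).mp hi
            simp only [Int.toNat_natCast] at hj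
            exact hj hj'
          simp [this, List.getElem?_eq_none, hj, Nat.le_of_not_lt (by simpa using hj)]
      rw [hslots]
      have := scatter_inv old_reqs rest (fun k => if k = r.1 then some r else g k) (d.erase r.1)
        (by
          intro k
          rw [get?_erase]
          by_cases hk : k = r.1
          · simp [hk]
          · rw [if_neg hk, hd k]
            simp [hk])
      simp only at this
      rw [this]
      apply List.map_congr_left
      intro p _
      by_cases hp : p.1 = r.1
      · simp [hp, hgr, List.find?_cons]
      · have : (p.1 == r.1) = false := by simpa using hp
        simp [hp, List.find?_cons, this]
    · -- r.1 already matched, or absent from old_reqs: nothing changes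
      rw [hstep, dif_neg hsome]
      rw [scatter_inv old_reqs rest g d hd]
      apply List.map_congr_left
      intro p hp
      by_cases hpr : p.1 = r.1
      · -- then g r.1 must be some (else pending would still hold r.1, since r.1 ∈ old names)
        have hg : (g r.1).isSome := by
          by_contra hgn
          have := hd r.1
          rw [if_neg hgn, get?_buildPending,
            if_pos (by exact List.mem_map.mpr ⟨p, hp, hpr⟩)] at this
          rw [this] at hsome; simp at hsome
        obtain ⟨v, hv⟩ := Option.isSome_iff_exists.mp hg
        simp [hpr, hv]
      · have : (p.1 == r.1) = false := by simpa using hpr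
        simp [List.find?_cons, this]

-- ===== VERDICT (by name: the statement is the Claim_ definition above) =====
theorem matching_reqs_spec : Claim_equal_matching_reqs := by
  intro old_reqs new_reqs _
  unfold Spec_matching_reqs matching_reqs matching_reqs_alt
  rw [foldl_append_some]
  simp only [List.nil_append]
  have hinit : (old_reqs.map (fun _ => (none : Option (String × String)))) =
      old_reqs.map (fun p => (fun _ : String => (none : Option (String × String))) p.1) := rfl
  rw [hinit, scatter_inv old_reqs new_reqs (fun _ => none) (pvBuildPending old_reqs)
    (by intro k; simp)]
  simp only [Option.none_or]
  rw [List.filterMap_map]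
  simp [find_package, Function.comp]
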